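-- pv_equiv track=rewrite | github.com/mindfold-ai/Trellis | .trellis/scripts/common/spec_index_toc.py | _md_row_first_cell
-- ===== SOURCE A (Python) =====
-- def _md_row_first_cell(line: str) -> str | None:
--     """First logical cell of a markdown pipe table row (handles padded columns)."""
--     stripped = line.strip()
--     if not stripped.startswith("|"):
--         return None
--     parts = [p.strip() for p in stripped.split("|")]
--     while parts and parts[0] == "":
--         parts.pop(0)
--     while parts and parts[-1] == "":
--         parts.pop(-1)
--     if not parts:
--         return None
--     return parts[0]
-- ===== SOURCE B (Python) =====
-- def _md_row_first_cell(line: str) -> str | None: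
--     """First logical cell of a markdown pipe table row (single forward scan)."""
--     stripped = line.strip()
--     if not stripped.startswith("|"):
--         return None
--     for part in stripped.split("|"):
--         cell = part.strip()
--         if cell:
--             return cell
--     return None
-- ===== Notes on version B (the rewrite author's own statement) =====
-- stated objective: simpler
-- what changed: Replaced the build-full-stripped-list plus double-ended while/pop trimming with a single early-exiting forward scan that returns the first non-empty stripped cell.
import Mathlib
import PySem

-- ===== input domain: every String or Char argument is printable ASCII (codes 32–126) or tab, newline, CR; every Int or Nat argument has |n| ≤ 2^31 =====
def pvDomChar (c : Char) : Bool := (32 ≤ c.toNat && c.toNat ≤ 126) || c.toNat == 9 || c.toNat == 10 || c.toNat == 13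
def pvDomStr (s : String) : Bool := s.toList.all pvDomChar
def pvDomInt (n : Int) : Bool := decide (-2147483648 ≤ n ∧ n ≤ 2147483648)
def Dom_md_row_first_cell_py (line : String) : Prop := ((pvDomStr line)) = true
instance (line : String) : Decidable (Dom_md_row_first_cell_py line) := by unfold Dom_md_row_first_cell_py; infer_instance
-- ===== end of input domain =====

-- B replaces A's full stripped-parts list and double-ended while/pop trimming by a single
-- early-exiting forward scan returning the first non-empty stripped cell (objective: simpler).

-- ===== PORT A =====
-- while parts and parts[0] == "": parts.pop(0)
def pvPopLeading : List String → List String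
  | [] => []
  | x :: xs => if x = "" then pvPopLeading xs else x :: xs

-- while parts and parts[-1] == "": parts.pop(-1)
def pvPopTrailing : List String → List String
  | [] => []
  | x :: xs =>
    match pvPopTrailing xs with
    | [] => if x = "" then [] else [x]
    | y :: ys => x :: y :: ys

def md_row_first_cell_py (line : String) : Option String :=
  let stripped := PySem.Str.strip line
  if PySem.Str.startswith stripped "|" then
    let parts := ((PySem.Str.split? stripped "|").getD []).map PySem.Str.strip  -- sep "|" ≠ "": split? is always some here
    let parts := pvPopLeading parts
    let parts := pvPopTrailing parts
    match parts with
    | [] => none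
    | p :: _ => some p
  else none

-- ===== PORT B =====
-- for part in …: cell = part.strip(); if cell: return cell
def pvScan : List String → Option String
  | [] => none
  | p :: ps =>
    let cell := PySem.Str.strip p
    if cell ≠ "" then some cell else pvScan ps

def md_row_first_cell_py_alt (line : String) : Option String :=
  let stripped := PySem.Str.strip line
  if PySem.Str.startswith stripped "|" then pvScan ((PySem.Str.split? stripped "|").getD [])  -- sep "|" ≠ "": split? is always some here
  else none

-- ===== PRECONDITION & SPEC =====
def Spec_md_row_first_cell_py (line : String) (out : Option String) : Prop := out = md_row_first_cell_py_alt line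
instance (line : String) (out : Option String) : Decidable (Spec_md_row_first_cell_py line out) := by unfold Spec_md_row_first_cell_py; infer_instance

-- ===== CLAIM (what is proved, stated in full; the proofs are below) =====
def Claim_equal_md_row_first_cell_py : Prop := ∀ (line : String), Dom_md_row_first_cell_py line → Spec_md_row_first_cell_py line (md_row_first_cell_py line)

-- ===== LEMMAS AND PROOFS =====

theorem popTrailing_head {x : String} (xs : List String) (h : x ≠ "") :
    (pvPopTrailing (x :: xs)).head? = some x := by
  unfold pvPopTrailing
  cases pvPopTrailing xs with
  | nil => simp [h]
  | cons y ys => simp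

theorem scan_eq (l : List String) :
    pvScan l = (pvPopTrailing (pvPopLeading (l.map PySem.Str.strip))).head? := by
  induction l with
  | nil => simp [pvScan, pvPopLeading, pvPopTrailing]
  | cons p ps ih =>
    simp only [pvScan, List.map_cons, pvPopLeading]
    by_cases h : PySem.Str.strip p = ""
    · simp [h, ih]
    · simp [h, popTrailing_head _ h]

-- ===== VERDICT (by name: the statement is the Claim_ definition above) =====
theorem md_row_first_cell_py_spec : Claim_equal_md_row_first_cell_py := by
  intro line _
  unfold Spec_md_row_first_cell_py md_row_first_cell_py md_row_first_cell_py_alt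
  by_cases h : PySem.Str.startswith (PySem.Str.strip line) "|" = true
  · simp only [h, if_true, scan_eq]
    cases pvPopTrailing (pvPopLeading (((PySem.Str.split? (PySem.Str.strip line) "|").getD []).map PySem.Str.strip)) <;> simp
  · rw [if_neg h, if_neg h]
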